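-- pv_equiv track=rewrite | github.com/FrazierMark/code_wars_kata_a_day | consecutive_count.py | get_consective_items
-- ===== SOURCE A (Python) =====
-- def get_consective_items(items, key):
--     current = 0
--     longest = 0
--     if isinstance(items, int):
--         items, key = str(items), str(key)
--     for item in items:
--         if item == key:
--             current += 1
--             if current > longest:
--                 longest = current
--         else:
--             current = 0
--     return longest
-- ===== SOURCE B (Python) =====
-- from itertools import groupby
--
-- def get_consective_items(items, key):
--     if isinstance(items, int):
--         items, key = str(items), str(key)
--     longest = 0
--     for val, grp in groupby(items):
--         if val == key:
--             n = sum(1 for _ in grp)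
--             if n > longest:
--                 longest = n
--     return longest
-- ===== Notes on version B (the rewrite author's own statement) =====
-- stated objective: idiomatic
-- what changed: B first splits the list into maximal consecutive runs with itertools.groupby and then takes the maximum length over the runs whose value equals key, instead of A's inline current/longest counter updated element by element.
import Mathlib
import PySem

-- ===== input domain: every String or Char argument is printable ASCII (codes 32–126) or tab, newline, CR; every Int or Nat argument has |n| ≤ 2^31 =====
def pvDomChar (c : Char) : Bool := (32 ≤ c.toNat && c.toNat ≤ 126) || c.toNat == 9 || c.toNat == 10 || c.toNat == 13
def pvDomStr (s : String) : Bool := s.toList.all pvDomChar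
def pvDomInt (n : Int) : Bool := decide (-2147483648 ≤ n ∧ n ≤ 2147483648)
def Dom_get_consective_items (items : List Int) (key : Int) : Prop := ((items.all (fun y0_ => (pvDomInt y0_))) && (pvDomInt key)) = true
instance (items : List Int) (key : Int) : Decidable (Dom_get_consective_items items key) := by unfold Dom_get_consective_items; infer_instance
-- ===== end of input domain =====

-- B computes the maximal consecutive runs first (groupby) and maximises over them,
-- instead of A's inline current/longest counter; same cost, more idiomatic.
-- (A's isinstance(items, int) branch is unreachable here: items is a list by type.)

-- ===== PORT A =====
-- the for loop over items with the two accumulators current / longest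
def pvLoopA (key : Int) : List Int → Int → Int → Int
  | [], _current, longest => longest
  | item :: rest, current, longest =>
      if item = key then
        pvLoopA key rest (current + 1)
          (if current + 1 > longest then current + 1 else longest)
      else
        pvLoopA key rest 0 longest

def get_consective_items (items : List Int) (key : Int) : Int :=
  pvLoopA key items 0 0

-- ===== PORT B =====
-- hand-port of itertools.groupby: run-length groups (value, length) in order
def pvAddRun (x : Int) : List (Int × Int) → List (Int × Int)
  | [] => [(x, 1)]
  | (v, n) :: rest => if v = x then (v, n + 1) :: rest else (x, 1) :: (v, n) :: rest

def pvRuns (items : List Int) : List (Int × Int) :=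
  items.foldr pvAddRun []

def get_consective_items_alt (items : List Int) (key : Int) : Int :=
  (pvRuns items).foldl
    (fun longest p => if p.1 = key then (if p.2 > longest then p.2 else longest) else longest) 0

-- ===== PRECONDITION & SPEC =====
def Spec_get_consective_items (items : List Int) (key : Int) (out : Int) : Prop := out = get_consective_items_alt items key
instance (items : List Int) (key : Int) (out : Int) : Decidable (Spec_get_consective_items items key out) := by unfold Spec_get_consective_items; infer_instance

-- ===== CLAIM (what is proved, stated in full; the proofs are below) =====
def Claim_equal_get_consective_items : Prop := ∀ (items : List Int) (key : Int), Dom_get_consective_items items key → Spec_get_consective_items items key (get_consective_items items key)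

-- ===== LEMMAS AND PROOFS =====

-- max over the run list, with an extra credit c added to a leading run of key
def pvFc (key : Int) : List (Int × Int) → Int → Int
  | [], _ => 0
  | (v, n) :: rest, c => if v = key then max (c + n) (pvFc key rest 0) else pvFc key rest 0

lemma pvAddRun_nonneg (x : Int) (rs : List (Int × Int))
    (h : ∀ p ∈ rs, 0 ≤ p.2) : ∀ p ∈ pvAddRun x rs, 0 ≤ p.2 := by
  cases rs with
  | nil => simp [pvAddRun]
  | cons q rest =>
      obtain ⟨v, n⟩ := q
      by_cases hv : v = x
      · simp only [pvAddRun, if_pos hv]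
        intro p hp
        rcases List.mem_cons.1 hp with h1 | h1
        · subst h1; have := h (v, n) (by simp); simp at this ⊢; omega
        · exact h p (List.mem_cons_of_mem _ h1)
      · simp only [pvAddRun, if_neg hv]
        intro p hp
        rcases List.mem_cons.1 hp with h1 | h1
        · subst h1; simp
        · exact h p h1

lemma pvRuns_nonneg (items : List Int) : ∀ p ∈ pvRuns items, 0 ≤ p.2 := by
  induction items with
  | nil => simp [pvRuns]
  | cons x xs ih =>
      simpa [pvRuns] using pvAddRun_nonneg x (pvRuns xs) (by simpa [pvRuns] using ih)

lemma pvFc_nonneg (key : Int) : ∀ (rs : List (Int × Int)) (c : Int), 0 ≤ pvFc key rs c := by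
  intro rs
  induction rs with
  | nil => intro c; simp [pvFc]
  | cons q rest ih =>
      intro c
      obtain ⟨v, n⟩ := q
      by_cases hv : v = key
      · simp only [pvFc, if_pos hv]
        have := ih 0; omega
      · simp only [pvFc, if_neg hv]
        exact ih 0

lemma pvLoopA_max (key : Int) :
    ∀ (xs : List Int) (c l : Int), 0 ≤ c → 0 ≤ l →
      pvLoopA key xs c l = max l (pvLoopA key xs c 0) := by
  intro xs
  induction xs with
  | nil => intro c l hc hl; simp [pvLoopA]; omega
  | cons x xs ih =>
      intro c l hc hl
      by_cases h : x = key
      · simp only [pvLoopA, if_pos h]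
        rw [ih (c + 1) (if c + 1 > l then c + 1 else l) (by omega) (by omega),
            ih (c + 1) (if c + 1 > 0 then c + 1 else 0) (by omega) (by omega)]
        have h0 : (if c + 1 > (0 : Int) then c + 1 else 0) = c + 1 := by omega
        rw [h0]
        omega
      · simp only [pvLoopA, if_neg h]
        exact ih 0 l (le_refl 0) hl

lemma pvFoldl_max (key : Int) :
    ∀ (rs : List (Int × Int)) (a : Int), 0 ≤ a →
      rs.foldl (fun longest p => if p.1 = key then (if p.2 > longest then p.2 else longest) else longest) a
        = max a (pvFc key rs 0) := by
  intro rs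
  induction rs with
  | nil => intro a ha; simp [pvFc]; omega
  | cons q rest ih =>
      intro a ha
      obtain ⟨v, n⟩ := q
      by_cases hv : v = key
      · simp only [List.foldl_cons, if_pos hv, pvFc]
        rw [ih (if n > a then n else a) (by omega)]
        omega
      · simp only [List.foldl_cons, if_neg hv, pvFc]
        exact ih a ha

lemma pvLoopA_eq_pvFc (key : Int) :
    ∀ (xs : List Int) (c : Int), 0 ≤ c →
      pvLoopA key xs c 0 = pvFc key (pvRuns xs) c := by
  intro xs
  induction xs with
  | nil => intro c hc; simp [pvLoopA, pvRuns, pvFc]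
  | cons x xs ih =>
      intro c hc
      have hruns : pvRuns (x :: xs) = pvAddRun x (pvRuns xs) := by simp [pvRuns]
      by_cases h : x = key
      · have hstep : pvLoopA key (x :: xs) c 0 = max (c + 1) (pvLoopA key xs (c + 1) 0) := by
          simp only [pvLoopA, if_pos h]
          have h0 : (if c + 1 > (0 : Int) then c + 1 else 0) = c + 1 := by omega
          rw [h0, pvLoopA_max key xs (c + 1) (c + 1) (by omega) (by omega)]
        rw [hstep, ih (c + 1) (by omega), hruns]
        rcases hr : pvRuns xs with _ | ⟨⟨v, n⟩, rest⟩
        · subst h; simp [pvFc, pvAddRun]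
        · have hn : 0 ≤ n := by
            have := pvRuns_nonneg xs (v, n) (by rw [hr]; simp)
            simpa using this
          by_cases hv : v = x
          · simp only [pvAddRun, if_pos hv, pvFc, if_pos (hv.trans h)]
            omega
          · have hvk : ¬ v = key := fun e => hv (e.trans h.symm)
            simp only [pvAddRun, if_neg hv, pvFc, if_neg hvk, if_pos h]
      · have hstep : pvLoopA key (x :: xs) c 0 = pvLoopA key xs 0 0 := by
          simp [pvLoopA, h]
        rw [hstep, ih 0 (le_refl 0), hruns]
        rcases hr : pvRuns xs with _ | ⟨⟨v, n⟩, rest⟩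
        · simp [pvFc, pvAddRun, h]
        · by_cases hv : v = x
          · have hvk : ¬ v = key := fun e => h (hv.symm.trans e)
            simp only [pvAddRun, if_pos hv, pvFc, if_neg hvk]
          · simp only [pvAddRun, if_neg hv, pvFc, if_neg h]

-- ===== VERDICT (by name: the statement is the Claim_ definition above) =====
theorem get_consective_items_spec : Claim_equal_get_consective_items := by
  intro items key _
  unfold Spec_get_consective_items get_consective_items get_consective_items_alt
  rw [pvLoopA_eq_pvFc key items 0 (le_refl 0),
      pvFoldl_max key (pvRuns items) 0 (le_refl 0)]
  have := pvFc_nonneg key (pvRuns items) 0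
  omega
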